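-- pv_equiv track=rewrite | github.com/taha1545/school-mangment-system | core/data_manager.py | is_real_class
-- ===== SOURCE A (Python) =====
-- from typing import Dict, List, Optional, Set, Any
--
-- def is_real_class(class_name: Optional[str]) -> bool:
--     if not class_name:
--         return False
--     class_str = str(class_name).strip()
--     real_classes = {f"{g}M{i}" for g in (1, 2, 3, 4) for i in range(1, 6)}
--     # quick membership
--     if class_str in real_classes:
--         return True
--     if class_str.endswith('_G1') or class_str.endswith('_G2'):
--         return False
--     if '_G1' in class_str or '_G2' in class_str:
--         return False
--     if 'استدراك' in class_str or '+' in class_str: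
--         return False
--     return True
-- ===== SOURCE B (Python) =====
-- def is_real_class(class_name):
--     # The 20-name set in the original is dead code: every name it contains has none
--     # of the rejection markers, and any marker-free string is accepted anyway.
--     # So the function reduces to: non-empty input and no rejection marker present.
--     if not class_name:
--         return False
--     s = str(class_name).strip()
--     for marker in ('_G1', '_G2', 'استدراك', '+'):
--         if marker in s:
--             return False
--     return True
-- ===== Notes on version B (the rewrite author's own statement) =====
-- stated objective: simpler
-- what changed: Eliminates the comprehension-built 20-element set and its membership test entirely (it is dead code: each of those names contains no rejection marker, and marker-free strings are accepted anyway) and folds the subsumed endswith checks into a single loop over the four rejection markers.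
import Mathlib
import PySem

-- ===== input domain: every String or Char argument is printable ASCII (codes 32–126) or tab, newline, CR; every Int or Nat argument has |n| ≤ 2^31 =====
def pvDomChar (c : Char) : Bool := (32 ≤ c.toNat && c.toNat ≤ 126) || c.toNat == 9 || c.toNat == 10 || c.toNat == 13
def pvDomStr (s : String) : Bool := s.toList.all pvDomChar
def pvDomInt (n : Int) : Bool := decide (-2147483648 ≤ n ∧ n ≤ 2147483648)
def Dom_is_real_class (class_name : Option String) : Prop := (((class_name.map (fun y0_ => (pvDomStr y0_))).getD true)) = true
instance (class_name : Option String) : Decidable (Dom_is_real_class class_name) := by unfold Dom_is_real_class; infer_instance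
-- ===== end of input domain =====

-- B drops A's comprehension-built 20-name set entirely (it is dead code: those names contain no
-- rejection marker, and marker-free strings are accepted anyway) and is a single loop over the
-- four rejection markers (simpler).

-- ===== PORT A =====
def is_real_class (class_name : Option String) : Bool :=
  match class_name with
  | none => false
  | some s =>
    if s == "" then false
    else
      let class_str := PySem.Str.strip s
      let real_classes : PySem.Set String :=
        PySem.Set.ofList (([1, 2, 3, 4] : List Int).flatMap (fun g =>
          (PySem.List.pyRange 1 6 1).map (fun i =>
            PySem.Int.toStr g ++ "M" ++ PySem.Int.toStr i)))
      if PySem.Set.contains real_classes class_str then true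
      else if PySem.Str.endswith class_str "_G1" || PySem.Str.endswith class_str "_G2" then false
      else if PySem.Str.isIn "_G1" class_str || PySem.Str.isIn "_G2" class_str then false
      else if PySem.Str.isIn "استدراك" class_str || PySem.Str.isIn "+" class_str then false
      else true

-- ===== PORT B =====
-- the 'for marker in (…): if marker in s: return False' loop of Source B
def pvMarkerHit : List String → String → Bool
  | [], _ => false
  | m :: ms, s => if PySem.Str.isIn m s then true else pvMarkerHit ms s

def is_real_class_alt (class_name : Option String) : Bool :=
  match class_name with
  | none => false
  | some s =>
    if s == "" then false
    else
      let t := PySem.Str.strip s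
      if pvMarkerHit ["_G1", "_G2", "استدراك", "+"] t then false else true

-- ===== PRECONDITION & SPEC =====
def Spec_is_real_class (class_name : Option String) (out : Bool) : Prop := out = is_real_class_alt class_name
instance (class_name : Option String) (out : Bool) : Decidable (Spec_is_real_class class_name out) := by unfold Spec_is_real_class; infer_instance

-- ===== CLAIM (what is proved, stated in full; the proofs are below) =====
def Claim_equal_is_real_class : Prop := ∀ (class_name : Option String), Dom_is_real_class class_name → Spec_is_real_class class_name (is_real_class class_name)

-- ===== LEMMAS AND PROOFS =====

-- A's set, evaluated to its literal 20 elements.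
lemma pvRealList_eval :
    PySem.Set.ofList (([1, 2, 3, 4] : List Int).flatMap (fun g =>
      (PySem.List.pyRange 1 6 1).map (fun i =>
        PySem.Int.toStr g ++ "M" ++ PySem.Int.toStr i)))
    = ["1M1", "1M2", "1M3", "1M4", "1M5",
       "2M1", "2M2", "2M3", "2M4", "2M5",
       "3M1", "3M2", "3M3", "3M4", "3M5",
       "4M1", "4M2", "4M3", "4M4", "4M5"] := by decide

-- a member of A's set contains none of the four rejection markers
lemma pvSetMember_no_marker (t : String)
    (h : PySem.Set.contains
      (["1M1", "1M2", "1M3", "1M4", "1M5",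
        "2M1", "2M2", "2M3", "2M4", "2M5",
        "3M1", "3M2", "3M3", "3M4", "3M5",
        "4M1", "4M2", "4M3", "4M4", "4M5"] : PySem.Set String) t = true) :
    pvMarkerHit ["_G1", "_G2", "استدراك", "+"] t = false := by
  rw [PySem.Set.contains_iff] at h
  simp only [List.mem_cons, List.not_mem_nil, or_false] at h
  rcases h with h | h | h | h | h | h | h | h | h | h |
               h | h | h | h | h | h | h | h | h | h <;> subst h <;> decide

-- an endswith hit implies the corresponding substring hit
lemma pvEnds_isIn (l p : List Char) (h : PySem.Chars.endswith l p = true) :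
    PySem.Chars.isIn p l = true := by
  rw [PySem.Chars.isIn_iff_infix]
  exact (PySem.Chars.endswith_iff _ _ |>.mp h).isInfix

-- ===== VERDICT (by name: the statement is the Claim_ definition above) =====
theorem is_real_class_spec : Claim_equal_is_real_class := by
  intro class_name _
  unfold Spec_is_real_class is_real_class is_real_class_alt
  cases class_name with
  | none => rfl
  | some s =>
    by_cases hs : s == ""
    · simp [hs]
    · simp only [hs, pvRealList_eval]
      set t := PySem.Str.strip s with ht
      by_cases hc : PySem.Set.contains
          (["1M1", "1M2", "1M3", "1M4", "1M5",
            "2M1", "2M2", "2M3", "2M4", "2M5",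
            "3M1", "3M2", "3M3", "3M4", "3M5",
            "4M1", "4M2", "4M3", "4M4", "4M5"] : PySem.Set String) t
      · have hm := pvSetMember_no_marker t hc
        simp only [hc, hm, Bool.false_eq_true, if_true, if_false]
      · simp only [hc]
        simp only [pvMarkerHit, PySem.Str.isIn_eq, PySem.Str.endswith_eq]
        by_cases h1 : PySem.Chars.isIn ['_', 'G', '1'] t.toList <;>
        by_cases h2 : PySem.Chars.isIn ['_', 'G', '2'] t.toList <;>
        by_cases he1 : PySem.Chars.endswith t.toList ['_', 'G', '1'] <;>
        by_cases he2 : PySem.Chars.endswith t.toList ['_', 'G', '2'] <;>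
        first
          | (simp [h1, h2, he1, he2]; done)
          | exact absurd (pvEnds_isIn _ _ he1) (by simp [h1])
          | exact absurd (pvEnds_isIn _ _ he2) (by simp [h2])
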